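-- pv_equiv track=rewrite | github.com/hymanimy/AdventOfCode | 2021/AOC10.py | complete_line
-- ===== SOURCE A (Python) =====
-- def find_closing_bracket(s,i):
--     # returns the of closing bracket to an opening bracket
--     # if there is no closing bracket, return -1
--     j=1
--     opening = ['[', '(', '<', '{']
--     closing = [']', ')', '>', '}']
--     while j > 0:
--         i+=1
--         if i >= len(s):
--             return -1
--         if s[i] in opening:
--             j+=1
--         else:
--             j-=1
--     return s[i]
--
-- def complete_line(s):
--     # returns an array with all the brackets required to complete a line
--     opening = ['[', '(', '<', '{']
--     closing = [']', ')', '>', '}']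
--     missing_characters = []
--     for i, char in enumerate(s):
--         if char not in opening:
--             continue
--         x = find_closing_bracket(s, i)
--         if x == -1:
--             # this means the bracket was never closed
--             expected_bracket = closing[opening.index(char)]
--             missing_characters.append(expected_bracket)
--     return missing_characters[::-1]
-- ===== SOURCE B (Python) =====
-- def complete_line(s):
--     # single pass: push openings, pop the most recent pending opening on any
--     # non-opening character, then emit the expected closers top-first
--     pairs = {'[': ']', '(': ')', '<': '>', '{': '}'}
--     stack = []
--     for ch in s:
--         if ch in pairs:
--             stack.append(ch)
--         elif stack:
--             stack.pop()
--     return [pairs[ch] for ch in reversed(stack)]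
-- ===== Notes on version B (the rewrite author's own statement) =====
-- stated objective: faster
-- what changed: Replaced the per-opening-bracket rescan of the rest of the string (find_closing_bracket) by a single left-to-right pass with a stack that pushes openings and pops on any non-opening character, emitting the expected closers top-first.
import Mathlib
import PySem

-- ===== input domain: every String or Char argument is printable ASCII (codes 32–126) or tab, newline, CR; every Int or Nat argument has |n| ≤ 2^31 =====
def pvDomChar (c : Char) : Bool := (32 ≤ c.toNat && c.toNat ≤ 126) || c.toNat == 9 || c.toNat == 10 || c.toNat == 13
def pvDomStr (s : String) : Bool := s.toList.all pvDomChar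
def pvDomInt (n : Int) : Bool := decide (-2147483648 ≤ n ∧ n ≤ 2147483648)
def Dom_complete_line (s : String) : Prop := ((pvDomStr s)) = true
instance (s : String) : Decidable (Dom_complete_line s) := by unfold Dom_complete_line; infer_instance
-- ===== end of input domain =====

-- B replaces A's per-opening rescan by one stack pass (asymptotically faster); return values proved equal on all inputs.

-- ===== PORT A =====
def pvOpening : List Char := ['[', '(', '<', '{']
def pvClosing : List Char := [']', ')', '>', '}']

-- the 'while j > 0' loop of find_closing_bracket; Python's '-1' result is ported
-- as none, 'return s[i]' as s[i]? (some, since i was just bounds-checked)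
def fcbLoop (s : List Char) (i : Nat) (j : Int) : Option Char :=
  if 0 < j then
    if h : i + 1 < s.length then
      if s[i + 1] ∈ pvOpening then fcbLoop s (i + 1) (j + 1)
      else fcbLoop s (i + 1) (j - 1)
    else none
  else s[i]?
termination_by s.length - i

def find_closing_bracket (s : List Char) (i : Nat) : Option Char := fcbLoop s i 1

-- loop body of complete_line; the enumerate index is a nonnegative Int, .toNat is exact
def clStep (l : List Char) (acc : List String) (p : Int × Char) : List String :=
  if p.2 ∈ pvOpening then
    if find_closing_bracket l p.1.toNat = none then
      -- closing[opening.index(char)]: char ∈ opening holds here, so index/getElem cannot fail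
      acc ++ [(pvClosing[pvOpening.idxOf p.2]!).toString]
    else acc
  else acc

def complete_line (s : String) : List String :=
  -- missing_characters[::-1] = reverse
  ((PySem.List.enumerate s.toList 0).foldl (clStep s.toList) []).reverse

-- ===== PORT B =====
def pvPairs : PySem.Dict Char String :=
  PySem.Dict.ofList [('[', "]"), ('(', ")"), ('<', ">"), ('{', "}")]

def complete_line_alt (s : String) : List String :=
  let stack := s.toList.foldl
    (fun st ch =>
      if pvPairs.contains ch then st ++ [ch]
      else if st ≠ [] then st.dropLast else st) []
  -- pairs[ch]: ch was pushed only if it is a key, so the lookup cannot fail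
  stack.reverse.map (fun ch => (pvPairs.get? ch).getD "")

-- ===== PRECONDITION & SPEC =====
def Spec_complete_line (s : String) (out : List String) : Prop := out = complete_line_alt s
instance (s : String) (out : List String) : Decidable (Spec_complete_line s out) := by unfold Spec_complete_line; infer_instance

-- ===== CLAIM (what is proved, stated in full; the proofs are below) =====
def Claim_equal_complete_line : Prop := ∀ (s : String), Dom_complete_line s → Spec_complete_line s (complete_line s)

-- ===== LEMMAS AND PROOFS =====

-- number of pops that would underflow an initially empty stack while scanning t
def dcnt : List Char → Nat
  | [] => 0
  | c :: t => if c ∈ pvOpening then dcnt t - 1 else dcnt t + 1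

-- unmatched opening characters of t, rightmost first
def uList : List Char → List Char
  | [] => []
  | c :: t => if c ∈ pvOpening then (if dcnt t = 0 then uList t ++ [c] else uList t) else uList t

-- abstract version of fcbLoop recording only whether it returns none
def loopN : List Char → Int → Bool
  | [], j => decide (0 < j)
  | c :: t, j => if 0 < j then loopN t (j + (if c ∈ pvOpening then 1 else -1)) else false

theorem loopN_iff_dcnt (t : List Char) : ∀ j : Int, loopN t j = true ↔ (dcnt t : Int) < j := by
  induction t with
  | nil => intro j; simp [loopN, dcnt]
  | cons c t ih =>
    intro j
    by_cases hc : c ∈ pvOpening <;>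
      simp only [loopN, dcnt, hc, if_pos, ite_false] <;>
      by_cases hj : (0 : Int) < j <;>
      simp [hj, ih] <;> omega

theorem fcb_eq_loopN (l : List Char) :
    ∀ n i j, l.length - i = n → i < l.length →
      ((fcbLoop l i j = none) ↔ loopN (l.drop (i + 1)) j = true) := by
  intro n
  induction n using Nat.strong_induction_on with
  | _ n ih =>
    intro i j hn hi
    rw [fcbLoop]
    by_cases hj : 0 < j
    · simp only [hj, if_pos]
      by_cases h1 : i + 1 < l.length
      · have hdrop : l.drop (i + 1) = l[i + 1] :: l.drop (i + 2) :=
          List.drop_eq_getElem_cons h1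
        rw [dif_pos h1, hdrop]
        by_cases hc : l[i + 1] ∈ pvOpening
        · rw [if_pos hc, ih (l.length - (i + 1)) (by omega) (i + 1) (j + 1) rfl h1]
          simp [loopN, hj, hc, show i + 1 + 1 = i + 2 from rfl]
        · rw [if_neg hc, ih (l.length - (i + 1)) (by omega) (i + 1) (j - 1) rfl h1]
          simp [loopN, hj, hc, sub_eq_add_neg, show i + 1 + 1 = i + 2 from rfl]
      · rw [dif_neg h1]
        have : l.drop (i + 1) = [] := List.drop_eq_nil_of_le (by omega)
        simp [this, loopN, hj]
    · simp only [hj, ite_false]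
      have hsome : l[i]? = some l[i] := List.getElem?_eq_getElem hi
      rw [hsome]
      cases hd : l.drop (i + 1) <;> simp [loopN, hj]

theorem fcb_none_iff (l : List Char) (i : Nat) (hi : i < l.length) :
    (find_closing_bracket l i = none) ↔ dcnt (l.drop (i + 1)) = 0 := by
  rw [find_closing_bracket, fcb_eq_loopN l (l.length - i) i 1 rfl hi, loopN_iff_dcnt]
  omega

-- expected closer as A computes it
def closerStrA (c : Char) : String := (pvClosing[pvOpening.idxOf c]!).toString

theorem drop_eq_cons_tail {l t : List Char} {c : Char} {n : Nat}
    (h : l.drop n = c :: t) : l.drop (n + 1) = t := by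
  have : l.drop (n + 1) = (l.drop n).drop 1 := by
    rw [List.drop_drop]
  rw [this, h]; rfl

theorem foldA_eq (l : List Char) :
    ∀ t n acc, l.drop n = t →
      (PySem.List.enumerate t (n : Int)).foldl (clStep l) acc
        = acc ++ ((uList t).reverse.map closerStrA) := by
  intro t
  induction t with
  | nil => intro n acc h; simp [PySem.List.enumerate_nil, uList]
  | cons c t ih =>
    intro n acc h
    have hn : n < l.length := by
      by_contra hle
      rw [List.drop_eq_nil_of_le (by omega)] at h
      simp at h
    have ht : l.drop (n + 1) = t := drop_eq_cons_tail h
    rw [PySem.List.enumerate_cons, List.foldl_cons]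
    have hcast : ((n : Int) + 1) = ((n + 1 : Nat) : Int) := by push_cast; ring
    have hfc : (find_closing_bracket l n = none) ↔ dcnt t = 0 := by
      rw [fcb_none_iff l n hn, ht]
    have hstep : clStep l acc ((n : Int), c)
        = if c ∈ pvOpening ∧ dcnt t = 0 then acc ++ [closerStrA c] else acc := by
      simp only [clStep, closerStrA, Int.toNat_natCast]
      by_cases hc : c ∈ pvOpening
      · by_cases hF : find_closing_bracket l n = none
        · simp [hc, hF, hfc.1 hF]
        · have hd : ¬ dcnt t = 0 := fun hz => hF (hfc.2 hz)
          simp [hc, hF, hd]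
      · simp [hc]
    rw [hstep, hcast, ih (n + 1) _ ht]
    by_cases hc : c ∈ pvOpening <;> by_cases hd : dcnt t = 0 <;>
      simp [uList, hc, hd]

-- B's fold on an arbitrary initial stack
theorem contains_pairs (c : Char) : pvPairs.contains c = true ↔ c ∈ pvOpening := by
  have hk : pvPairs.keys = ['[', '(', '<', '{'] := by decide
  rw [PySem.Dict.contains_eq_decide_mem_keys, hk]
  simp [pvOpening]

theorem foldB_eq (t : List Char) :
    ∀ st : List Char,
      t.foldl (fun st ch =>
        if pvPairs.contains ch then st ++ [ch]
        else if st ≠ [] then st.dropLast else st) st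
      = st.take (st.length - dcnt t) ++ (uList t).reverse := by
  induction t with
  | nil => intro st; simp [dcnt, uList]
  | cons c t ih =>
    intro st
    rw [List.foldl_cons]
    by_cases hc : c ∈ pvOpening
    · have hcc : pvPairs.contains c = true := (contains_pairs c).2 hc
      rw [if_pos hcc, ih (st ++ [c])]
      by_cases hd : dcnt t = 0
      · simp [dcnt, uList, hc, hd, List.take_of_length_le]
      · have h1 : st.length + 1 - dcnt t ≤ st.length := by omega
        rw [List.length_append, List.length_singleton,
            List.take_append_of_le_length h1]
        simp only [dcnt, uList, hc, if_pos, hd, ite_false]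
        have : st.length + 1 - dcnt t = st.length - (dcnt t - 1) := by omega
        rw [this]
    · have hcc : ¬ pvPairs.contains c = true := fun h => hc ((contains_pairs c).1 h)
      rw [if_neg hcc]
      by_cases hst : st = []
      · subst hst
        simp only [ne_eq, not_true_eq_false, ite_false]
        rw [ih []]
        simp [dcnt, uList, hc]
      · rw [if_pos hst, ih st.dropLast]
        simp only [dcnt, uList, hc, ite_false, List.length_dropLast]
        have h2 : st.length - 1 - dcnt t ≤ st.length - 1 := by omega
        rw [List.dropLast_eq_take, List.take_take]
        have : min (st.length - 1 - dcnt t) (st.length - 1) = st.length - (dcnt t + 1) := by omega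
        rw [this]

theorem uList_mem_open : ∀ t c, c ∈ uList t → c ∈ pvOpening := by
  intro t
  induction t with
  | nil => intro c h; simp [uList] at h
  | cons x t ih =>
    intro c h
    by_cases hx : x ∈ pvOpening <;> by_cases hd : dcnt t = 0 <;>
      simp only [uList, hx, hd, if_pos, ite_false] at h
    · rcases List.mem_append.1 h with h | h
      · exact ih c h
      · simp at h; subst h; exact hx
    · exact ih c h
    · exact ih c h
    · exact ih c h

theorem lookup_eq_closer (c : Char) (hc : c ∈ pvOpening) :
    (pvPairs.get? c).getD "" = closerStrA c := by
  fin_cases hc <;> decide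

-- ===== VERDICT (by name: the statement is the Claim_ definition above) =====
theorem complete_line_spec : Claim_equal_complete_line := by
  intro s _
  unfold Spec_complete_line
  show complete_line s = complete_line_alt s
  have hA := foldA_eq s.toList s.toList 0 [] (by simp)
  rw [Nat.cast_zero] at hA
  simp only [complete_line, complete_line_alt, hA, foldB_eq]
  simp only [List.take_nil, List.nil_append, List.map_reverse, List.reverse_reverse]
  exact (List.map_congr_left fun c hc =>
    (lookup_eq_closer c (uList_mem_open _ c hc)).symm)
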